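-- pv_equiv track=rewrite | github.com/djrrb/Voice-leading-visualizer | src/voiceLeading.py | toneToSemitone
-- ===== SOURCE A (Python) =====
-- semitones = {
--     0: '1',
--     1: ['#1', 'b2'],
--     2: '2',
--     3: ['#2', 'b3'],
--     4: '3',
--     5: '4',
--     6: ['#4', 'b5'],
--     7: '5',
--     8: ['#5', 'b6'],
--     9: '6',
--     10: ['#6', 'b7'],
--     11: '7',
--     }
--
-- def toneToSemitone(semitone, octaveOffset=0):
--     toneToSemitoneMap = {}
--     for k, v in semitones.items():
--         if type(v) is not list:
--             v = [v]
--         for i in v: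
--             toneToSemitoneMap[i] = k
--     return toneToSemitoneMap[semitone] + octaveOffset*12
-- ===== SOURCE B (Python) =====
-- def toneToSemitone(semitone, octaveOffset=0):
--     # Closed-form: parse "<accidental?><degree>" and compute arithmetically,
--     # no lookup table of names at all.
--     acc = 0
--     name = semitone
--     if name and name[0] in '#b':
--         acc = 1 if name[0] == '#' else -1
--         name = name[1:]
--     if len(name) == 1 and '1' <= name <= '7':
--         return (0, 2, 4, 5, 7, 9, 11)[int(name) - 1] + acc + octaveOffset * 12
--     raise KeyError(semitone)
-- ===== Notes on version B (the rewrite author's own statement) =====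
-- stated objective: alternative
-- what changed: B drops the name table entirely: it parses the optional '#'/'b' accidental and the scale degree 1-7 and computes the semitone arithmetically from the major-scale offsets, instead of A's building a reverse name-to-number dict and subscripting it.
import Mathlib
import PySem

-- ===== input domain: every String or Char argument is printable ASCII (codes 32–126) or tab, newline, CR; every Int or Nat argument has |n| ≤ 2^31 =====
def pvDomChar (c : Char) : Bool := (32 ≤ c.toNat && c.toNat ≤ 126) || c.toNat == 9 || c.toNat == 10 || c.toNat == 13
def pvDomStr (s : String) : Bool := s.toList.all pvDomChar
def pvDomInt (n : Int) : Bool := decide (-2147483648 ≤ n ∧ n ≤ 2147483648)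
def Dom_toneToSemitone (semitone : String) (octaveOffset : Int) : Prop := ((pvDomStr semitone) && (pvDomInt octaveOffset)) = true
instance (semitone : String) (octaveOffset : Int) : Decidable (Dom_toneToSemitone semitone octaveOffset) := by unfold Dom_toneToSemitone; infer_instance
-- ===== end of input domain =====

-- B replaces A's reverse-dict build-and-lookup by a closed-form parse of
-- "<accidental?><degree>" plus major-scale arithmetic (objective: alternative);
-- equal on all names in A's table (Pre_); elsewhere A raises KeyError.

-- ===== PORT A =====
-- the shared module constant `semitones`; Python's str-or-list values are
-- normalized to lists (exactly what A's `if type(v) is not list: v = [v]` does)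
def pvSemitones : List (Int × List String) :=
  [(0, ["1"]), (1, ["#1", "b2"]), (2, ["2"]), (3, ["#2", "b3"]), (4, ["3"]),
   (5, ["4"]), (6, ["#4", "b5"]), (7, ["5"]), (8, ["#5", "b6"]), (9, ["6"]),
   (10, ["#6", "b7"]), (11, ["7"])]

def toneToSemitone (semitone : String) (octaveOffset : Int) : Int :=
  -- the two nested for-loops building toneToSemitoneMap
  let m : PySem.Dict String Int :=
    pvSemitones.foldl (fun d kv => kv.2.foldl (fun d i => d.insert i kv.1) d) PySem.Dict.empty
  -- toneToSemitoneMap[semitone]: KeyError (none) is excluded by Pre_; 0 is a dummy there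
  (m.get? semitone).getD 0 + octaveOffset * 12

-- ===== PORT B =====
-- closed-form parse: optional accidental, then a single degree char '1'..'7';
-- KeyError (dummy 0) on any other shape, excluded by Pre_
def toneToSemitone_alt (semitone : String) (octaveOffset : Int) : Int :=
  let chars := semitone.toList
  let p : Int × List Char :=
    match chars with
    | c :: rest =>
      if c = '#' then (1, rest) else if c = 'b' then (-1, rest) else (0, chars)
    | [] => (0, chars)
  match p.2 with
  | [d] =>
    if '1' ≤ d ∧ d ≤ '7' then
      ([0, 2, 4, 5, 7, 9, 11] : List Int).getD (d.toNat - '1'.toNat) 0 + p.1 + octaveOffset * 12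
    else 0
  | _ => 0

-- ===== PRECONDITION & SPEC =====
-- Pre_ admits exactly the inputs on which Python A returns: the 17 names in the
-- table; on any other string A raises KeyError.
def Pre_toneToSemitone (semitone : String) (octaveOffset : Int) : Prop :=
  semitone ∈ ["1", "#1", "b2", "2", "#2", "b3", "3", "4", "#4", "b5",
              "5", "#5", "b6", "6", "#6", "b7", "7"]
instance (semitone : String) (octaveOffset : Int) : Decidable (Pre_toneToSemitone semitone octaveOffset) := by unfold Pre_toneToSemitone; infer_instance

def pvWitness_toneToSemitone : String × Int := ("b3", 1)

def Spec_toneToSemitone (semitone : String) (octaveOffset : Int) (out : Int) : Prop := out = toneToSemitone_alt semitone octaveOffset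
instance (semitone : String) (octaveOffset : Int) (out : Int) : Decidable (Spec_toneToSemitone semitone octaveOffset out) := by unfold Spec_toneToSemitone; infer_instance

-- ===== CLAIM (what is proved, stated in full; the proofs are below) =====
def Claim_equal_toneToSemitone : Prop := ∀ (semitone : String) (octaveOffset : Int), Dom_toneToSemitone semitone octaveOffset → Pre_toneToSemitone semitone octaveOffset → Spec_toneToSemitone semitone octaveOffset (toneToSemitone semitone octaveOffset)

-- ===== LEMMAS AND PROOFS =====

-- ===== VERDICT (by name: the statement is the Claim_ definition above) =====
theorem toneToSemitone_spec : Claim_equal_toneToSemitone := by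
  intro s o _ hpre
  unfold Spec_toneToSemitone
  unfold Pre_toneToSemitone at hpre
  simp only [List.mem_cons, List.not_mem_nil, or_false] at hpre
  rcases hpre with h|h|h|h|h|h|h|h|h|h|h|h|h|h|h|h|h <;> subst h <;>
    simp [toneToSemitone, toneToSemitone_alt, pvSemitones] <;> decide
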